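-- pv_equiv track=rewrite | github.com/artisan1218/LeetCode-Solution | solutions/minWindow/minWindow.py | validSubstr
-- ===== SOURCE A (Python) =====
-- def validSubstr(substr, tCount):
--         tCopy = tCount.copy()
--         tLen = sum(tCount.values())
--         for check in substr:
--             if tCopy.get(check, 0)>0:
--                 tLen-=1
--                 tCopy[check]-=1
--         return tLen==0
-- ===== SOURCE B (Python) =====
-- def validSubstr(substr, tCount):
--     sub = {}
--     for ch in substr:
--         sub[ch] = sub.get(ch, 0) + 1
--     need = 0
--     matched = 0
--     for c, v in tCount.items():
--         need += v
--         if v > 0: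
--             matched += min(sub.get(c, 0), v)
--     return need == matched
-- ===== Notes on version B (the rewrite author's own statement) =====
-- stated objective: idiomatic
-- what changed: Instead of mutating a copy of the requirement dict while scanning substr and counting down a running total, B builds a frequency table of substr once and then loops over the requirements, summing min(available, required) for positive requirements and comparing it to the total requirement.
import Mathlib
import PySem

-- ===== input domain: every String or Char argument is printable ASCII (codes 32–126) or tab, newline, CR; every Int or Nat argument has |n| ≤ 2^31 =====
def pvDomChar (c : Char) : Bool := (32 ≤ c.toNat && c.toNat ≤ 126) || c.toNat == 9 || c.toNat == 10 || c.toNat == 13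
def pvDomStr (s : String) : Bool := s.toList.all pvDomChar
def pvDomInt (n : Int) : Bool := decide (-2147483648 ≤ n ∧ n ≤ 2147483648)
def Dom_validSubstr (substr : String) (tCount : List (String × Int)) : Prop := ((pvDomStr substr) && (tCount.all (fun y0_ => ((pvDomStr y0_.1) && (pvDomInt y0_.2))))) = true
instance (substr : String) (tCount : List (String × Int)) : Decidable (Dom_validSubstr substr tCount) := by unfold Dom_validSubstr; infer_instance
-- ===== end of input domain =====

-- B replaces A's mutate-a-copy countdown scan of substr by: count substr once, then sum
-- min(available, required) over the positive requirements and compare to the total requirement.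

-- ===== PORT A =====
-- 'for check in substr': Python iterates 1-character strings, so we fold over the chars as strings.
def validSubstr (substr : String) (tCount : List (String × Int)) : Bool :=
  let tCopy : PySem.Dict String Int := PySem.Dict.mk tCount
  let tLen : Int := (PySem.Dict.values (PySem.Dict.mk tCount)).sum
  let st :=
    (substr.toList.map (fun ch => String.ofList [ch])).foldl
      (fun (st : Int × PySem.Dict String Int) check =>
        if PySem.Dict.getD st.2 check 0 > 0 then
          (st.1 - 1, PySem.Dict.modify st.2 check 0 (· - 1))
        else st)
      (tLen, tCopy)
  st.1 == 0

-- ===== PORT B =====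
def validSubstr_alt (substr : String) (tCount : List (String × Int)) : Bool :=
  let sub : PySem.Dict String Int :=
    (substr.toList.map (fun ch => String.ofList [ch])).foldl
      (fun d k => PySem.Dict.insert d k (PySem.Dict.getD d k 0 + 1)) PySem.Dict.empty
  let nm :=
    tCount.foldl
      (fun (st : Int × Int) p =>
        (st.1 + p.2, if p.2 > 0 then st.2 + min (PySem.Dict.getD sub p.1 0) p.2 else st.2))
      (0, 0)
  nm.1 == nm.2

-- ===== PRECONDITION & SPEC =====
-- Pre_ excludes association lists with duplicate keys: they represent no Python dict (dict keys
-- are unique), so neither Python function is ever called on such an input.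
def Pre_validSubstr (substr : String) (tCount : List (String × Int)) : Prop :=
  (tCount.map Prod.fst).Nodup
instance (substr : String) (tCount : List (String × Int)) : Decidable (Pre_validSubstr substr tCount) := by unfold Pre_validSubstr; infer_instance

def pvWitness_validSubstr : String × (List (String × Int)) := ("aab", [("a", 2), ("b", 1)])

def Spec_validSubstr (substr : String) (tCount : List (String × Int)) (out : Bool) : Prop := out = validSubstr_alt substr tCount
instance (substr : String) (tCount : List (String × Int)) (out : Bool) : Decidable (Spec_validSubstr substr tCount out) := by unfold Spec_validSubstr; infer_instance

-- ===== CLAIM (what is proved, stated in full; the proofs are below) =====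
def Claim_equal_validSubstr : Prop := ∀ (substr : String) (tCount : List (String × Int)), Dom_validSubstr substr tCount → Pre_validSubstr substr tCount → Spec_validSubstr substr tCount (validSubstr substr tCount)

-- ===== LEMMAS AND PROOFS =====

-- how many times A's loop decrements the entry holding v, after m occurrences of its key
def pvDec (v m : Int) : Int := if v > 0 then min m v else 0

theorem pvDec_zero (v : Int) : pvDec v 0 = 0 := by
  unfold pvDec; split_ifs with h <;> omega

theorem pvDec_succ_of_lt {v m : Int} (hv : 0 < v) (h : m < v) :
    pvDec v (m + 1) = pvDec v m + 1 := by
  unfold pvDec; simp only [if_pos hv]; omega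

theorem pvDec_succ_of_ge {v m : Int} (h : ¬ v - pvDec v m > 0) :
    pvDec v (m + 1) = pvDec v m := by
  unfold pvDec at *; split_ifs at * with hv <;> omega

theorem pvDec_pos_inv {v m : Int} (h : v - pvDec v m > 0) :
    0 < v ∧ m < v := by
  unfold pvDec at h; split_ifs at h with hv <;> omega

-- in a list with distinct keys the entry at a present key is unique
theorem assoc_uniq {k0 : String} {v : Int} {l : List (String × Int)}
    (hnd : (l.map Prod.fst).Nodup) (h1 : (k0, v) ∈ l) {q : String × Int}
    (hq : q ∈ l) (hk : q.1 = k0) : q = (k0, v) := by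
  induction l with
  | nil => cases h1
  | cons p l ih =>
      simp only [List.map_cons, List.nodup_cons] at hnd
      rcases List.mem_cons.mp h1 with h1' | h1' <;> rcases List.mem_cons.mp hq with hq' | hq'
      · rw [hq', ← h1']
      · exfalso; subst h1'; exact hnd.1 (List.mem_map.mpr ⟨q, hq', hk⟩)
      · exfalso; subst hq'; exact hnd.1 (List.mem_map.mpr ⟨(k0, v), h1', hk.symm⟩)
      · exact ih hnd.2 h1' hq'

-- the key-count of cs ++ [k0], as an Int
theorem count_append_singleton_int (cs : List String) (k0 k : String) :
    (((cs ++ [k0]).count k : Nat) : Int)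
      = ((cs.count k : Nat) : Int) + (if k = k0 then 1 else 0) := by
  by_cases h : k = k0
  · subst h; simp [List.count_append]
  · simp [List.count_append, h, Ne.symm h]

theorem sum_step_true {k0 : String} {v : Int} (m1 m2 : String → Int)
    (hne : ∀ k, k ≠ k0 → m2 k = m1 k) (heq : m2 k0 = m1 k0 + 1)
    (hv : 0 < v) (hlt : m1 k0 < v) :
    ∀ l : List (String × Int), (l.map Prod.fst).Nodup → (k0, v) ∈ l →
    (l.map (fun p => pvDec p.2 (m2 p.1))).sum
      = (l.map (fun p => pvDec p.2 (m1 p.1))).sum + 1 := by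
  intro l
  induction l with
  | nil => intro _ h; cases h
  | cons p l ih =>
      intro hnd hmem
      simp only [List.map_cons, List.nodup_cons] at hnd
      simp only [List.map_cons, List.sum_cons]
      by_cases hk : p.1 = k0
      · have hp : p = (k0, v) := by
          rcases List.mem_cons.mp hmem with h | h
          · rw [h]
          · exact absurd (List.mem_map.mpr ⟨(k0, v), h, hk.symm⟩) hnd.1
        have htail : (l.map (fun p => pvDec p.2 (m2 p.1)))
            = l.map (fun p => pvDec p.2 (m1 p.1)) := by
          apply List.map_congr_left
          intro q hq
          have hqk : q.1 ≠ k0 := by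
            intro h; exact hnd.1 (List.mem_map.mpr ⟨q, hq, h.trans hk.symm⟩)
          rw [hne _ hqk]
        subst hp
        rw [htail]
        show pvDec v (m2 k0) + _ = pvDec v (m1 k0) + _ + 1
        rw [heq, pvDec_succ_of_lt hv hlt]
        ring
      · have hmem' : (k0, v) ∈ l := by
          rcases List.mem_cons.mp hmem with h | h
          · exact absurd (congrArg Prod.fst h).symm hk
          · exact h
        rw [show pvDec p.2 (m2 p.1) = pvDec p.2 (m1 p.1) by rw [hne _ hk],
            ih hnd.2 hmem']
        ring

theorem map_step_true {k0 : String} {v : Int} (m1 m2 : String → Int)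
    (hne : ∀ k, k ≠ k0 → m2 k = m1 k) (heq : m2 k0 = m1 k0 + 1)
    (hv : 0 < v) (hlt : m1 k0 < v)
    (l : List (String × Int)) (hnd : (l.map Prod.fst).Nodup) (hmem : (k0, v) ∈ l) :
    ((l.map (fun p => (p.1, p.2 - pvDec p.2 (m1 p.1)))).map
        (fun p => if p.1 == k0 then (k0, v - pvDec v (m1 k0) - 1) else p))
      = l.map (fun p => (p.1, p.2 - pvDec p.2 (m2 p.1))) := by
  rw [List.map_map]
  apply List.map_congr_left
  intro q hq
  by_cases hk : q.1 = k0
  · have hq' : q = (k0, v) := assoc_uniq hnd hmem hq hk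
    subst hq'
    show (if (k0 == k0) = true then _ else _) = _
    rw [if_pos (by simp), heq, pvDec_succ_of_lt hv hlt]
    show ((k0 : String), v - pvDec v (m1 k0) - 1) = (k0, v - (pvDec v (m1 k0) + 1))
    rw [Prod.mk.injEq]
    exact ⟨rfl, by ring⟩
  · show (if (q.1 == k0) = true then _ else _) = _
    rw [if_neg (by simpa using hk), hne _ hk]

theorem validSubstr_alt_loop (d : PySem.Dict String Int) (l : List (String × Int)) :
    ∀ init : Int × Int,
    l.foldl
      (fun (st : Int × Int) p =>
        (st.1 + p.2, if p.2 > 0 then st.2 + min (PySem.Dict.getD d p.1 0) p.2 else st.2))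
      init
    = (init.1 + (l.map Prod.snd).sum,
       init.2 + (l.map (fun p => if p.2 > 0 then min (PySem.Dict.getD d p.1 0) p.2 else 0)).sum) := by
  induction l with
  | nil => intro init; simp
  | cons p l ih =>
      intro init
      simp only [List.foldl_cons, List.map_cons, List.sum_cons, ih]
      rw [Prod.mk.injEq]
      constructor
      · show init.1 + p.2 + _ = _; ring
      · show (if p.2 > 0 then init.2 + min (PySem.Dict.getD d p.1 0) p.2 else init.2) + _ = _
        split_ifs with h <;> ring

-- A's loop invariant: after processing the key list cs, the running total is
-- sum(values) minus Σ pvDec, and the dict holds each value minus its pvDec.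
theorem validSubstr_loop (tCount : List (String × Int))
    (hnd : (tCount.map Prod.fst).Nodup) (cs : List String) :
    cs.foldl
      (fun (st : Int × PySem.Dict String Int) check =>
        if PySem.Dict.getD st.2 check 0 > 0 then
          (st.1 - 1, PySem.Dict.modify st.2 check 0 (· - 1))
        else st)
      ((tCount.map Prod.snd).sum, PySem.Dict.mk tCount)
    = ((tCount.map Prod.snd).sum
         - (tCount.map (fun p => pvDec p.2 ((cs.count p.1 : Nat) : Int))).sum,
       PySem.Dict.mk (tCount.map (fun p => (p.1, p.2 - pvDec p.2 ((cs.count p.1 : Nat) : Int))))) := by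
  induction cs using List.reverseRecOn with
  | nil =>
      simp [pvDec_zero]
  | append_singleton cs k0 ih =>
      rw [List.foldl_append, ih, List.foldl_cons, List.foldl_nil]
      set M := tCount.map (fun p => (p.1, p.2 - pvDec p.2 ((cs.count p.1 : Nat) : Int))) with hM
      have hMkeys : M.map Prod.fst = tCount.map Prod.fst := by
        rw [hM, List.map_map]; rfl
      have hMnd : (PySem.Dict.mk M).keys.Nodup := by
        show (M.map Prod.fst).Nodup
        rw [hMkeys]; exact hnd
      by_cases hk : k0 ∈ tCount.map Prod.fst
      · obtain ⟨p0, hp0, hfst⟩ := List.mem_map.mp hk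
        obtain ⟨k0', v⟩ := p0
        have hfst' : k0' = k0 := hfst
        subst hfst'
        have hmemM : (k0', v - pvDec v ((cs.count k0' : Nat) : Int)) ∈ (PySem.Dict.mk M).items := by
          show _ ∈ M
          rw [hM]; exact List.mem_map.mpr ⟨(k0', v), hp0, rfl⟩
        have hget : (PySem.Dict.mk M).getD k0' 0 = v - pvDec v ((cs.count k0' : Nat) : Int) :=
          PySem.Dict.getD_of_mem_items _ hmemM hMnd 0
        by_cases hc : v - pvDec v ((cs.count k0' : Nat) : Int) > 0
        · rw [if_pos (by rw [hget]; exact hc)]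
          obtain ⟨hv, hlt⟩ := pvDec_pos_inv hc
          have hne : ∀ k, k ≠ k0' → (((cs ++ [k0']).count k : Nat) : Int) = ((cs.count k : Nat) : Int) := by
            intro k hkk; rw [count_append_singleton_int, if_neg hkk]; ring
          have heq : (((cs ++ [k0']).count k0' : Nat) : Int) = ((cs.count k0' : Nat) : Int) + 1 := by
            rw [count_append_singleton_int, if_pos rfl]
          rw [Prod.mk.injEq]
          constructor
          · rw [sum_step_true _ _ hne heq hv hlt tCount hnd hp0]; ring
          · apply PySem.Dict.ext
            show ((PySem.Dict.mk M).modify k0' 0 (· - 1)).items = _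
            have hcont : (PySem.Dict.mk M).contains k0' = true := by
              rw [PySem.Dict.contains_eq_decide_mem_keys]
              simp only [decide_eq_true_eq]
              show k0' ∈ M.map Prod.fst
              rw [hMkeys]; exact hk
            show ((PySem.Dict.mk M).insert k0' ((PySem.Dict.mk M).getD k0' 0 - 1)).items = _
            rw [PySem.Dict.items_insert_of_contains _ _ hcont, hget]
            show (M.map (fun p => if p.1 == k0' then (k0', v - pvDec v ((cs.count k0' : Nat) : Int) - 1) else p)) = _
            rw [hM, map_step_true _ _ hne heq hv hlt tCount hnd hp0]
        · rw [if_neg (by rw [hget]; exact hc)]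
          have hcongr : ∀ q ∈ tCount,
              pvDec q.2 (((cs ++ [k0']).count q.1 : Nat) : Int) = pvDec q.2 ((cs.count q.1 : Nat) : Int) := by
            intro q hq
            by_cases hqk : q.1 = k0'
            · have : q = (k0', v) := assoc_uniq hnd hp0 hq hqk
              subst this
              rw [count_append_singleton_int, if_pos rfl]
              exact pvDec_succ_of_ge hc
            · rw [count_append_singleton_int, if_neg hqk, add_zero]
          have hmapeq : tCount.map (fun p => pvDec p.2 ((((cs ++ [k0']).count p.1 : Nat)) : Int))
              = tCount.map (fun p => pvDec p.2 ((cs.count p.1 : Nat) : Int)) :=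
            List.map_congr_left hcongr
          have hmapeq2 : tCount.map (fun p => (p.1, p.2 - pvDec p.2 ((((cs ++ [k0']).count p.1 : Nat)) : Int)))
              = tCount.map (fun p => (p.1, p.2 - pvDec p.2 ((cs.count p.1 : Nat) : Int))) :=
            List.map_congr_left (fun q hq => by rw [hcongr q hq])
          rw [hmapeq, hmapeq2, hM]
      · have hget : (PySem.Dict.mk M).getD k0 0 = 0 := by
          apply PySem.Dict.getD_of_not_contains
          rw [PySem.Dict.contains_eq_decide_mem_keys]
          simp only [decide_eq_false_iff_not]
          show k0 ∉ M.map Prod.fst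
          rw [hMkeys]; exact hk
        rw [if_neg (by rw [hget]; omega)]
        have hcongr : ∀ q ∈ tCount,
            pvDec q.2 (((cs ++ [k0]).count q.1 : Nat) : Int) = pvDec q.2 ((cs.count q.1 : Nat) : Int) := by
          intro q hq
          have hqk : q.1 ≠ k0 := by
            intro h; exact hk (h ▸ List.mem_map_of_mem hq)
          rw [count_append_singleton_int, if_neg hqk, add_zero]
        have hmapeq : tCount.map (fun p => pvDec p.2 ((((cs ++ [k0]).count p.1 : Nat)) : Int))
            = tCount.map (fun p => pvDec p.2 ((cs.count p.1 : Nat) : Int)) :=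
          List.map_congr_left hcongr
        have hmapeq2 : tCount.map (fun p => (p.1, p.2 - pvDec p.2 ((((cs ++ [k0]).count p.1 : Nat)) : Int)))
            = tCount.map (fun p => (p.1, p.2 - pvDec p.2 ((cs.count p.1 : Nat) : Int))) :=
          List.map_congr_left (fun q hq => by rw [hcongr q hq])
        rw [hmapeq, hmapeq2, hM]

-- ===== VERDICT (by name: the statement is the Claim_ definition above) =====
theorem validSubstr_spec : Claim_equal_validSubstr := by
  intro substr tCount _ hpre
  unfold Spec_validSubstr validSubstr validSubstr_alt
  dsimp only
  rw [show PySem.Dict.values (PySem.Dict.mk tCount) = tCount.map Prod.snd from rfl]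
  rw [validSubstr_loop tCount hpre (substr.toList.map (fun ch => String.ofList [ch]))]
  rw [validSubstr_alt_loop]
  simp only [zero_add]
  have hcnt : ∀ p : String × Int, p ∈ tCount →
      ((substr.toList.map (fun ch => String.ofList [ch])).foldl
        (fun d k => PySem.Dict.insert d k (PySem.Dict.getD d k 0 + 1)) PySem.Dict.empty).getD p.1 0
      = (((substr.toList.map (fun ch => String.ofList [ch])).count p.1 : Nat) : Int) := by
    intro p _
    rw [PySem.Dict.getD_foldl_insert_add_one]
    simp [PySem.Dict.getD_empty]
  have hsum : ((tCount.map (fun p => if p.2 > 0 then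
        min (((substr.toList.map (fun ch => String.ofList [ch])).foldl
          (fun d k => PySem.Dict.insert d k (PySem.Dict.getD d k 0 + 1)) PySem.Dict.empty).getD p.1 0) p.2
        else 0))).sum
      = (tCount.map (fun p => pvDec p.2
          (((substr.toList.map (fun ch => String.ofList [ch])).count p.1 : Nat) : Int))).sum := by
    congr 1
    apply List.map_congr_left
    intro q hq
    rw [hcnt q hq]
    unfold pvDec
    rfl
  rw [hsum]
  set S := (tCount.map Prod.snd).sum
  set T := (tCount.map (fun p => pvDec p.2
      (((substr.toList.map (fun ch => String.ofList [ch])).count p.1 : Nat) : Int))).sum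
  show (S - T == 0) = (S == T)
  by_cases h : S = T
  · simp [h]
  · have h' : S - T ≠ 0 := fun hh => h (by omega)
    simp [h, h']
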